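-- pv_equiv track=rewrite | github.com/carvey/Cadet-Logistics | Utils/global_utils.py | order_dict
-- ===== SOURCE A (Python) =====
-- import collections
--
-- def order_dict(mapping, n=None):
--     """
--     Order a dict by keys, with an option arg to limit the number of top keys to get
--     :param mapping:
--     :param n: optional number of top args to get
--     :return: An ordered dict
--     """
--     top_items = collections.OrderedDict()
--     length = n or len(mapping)
--     for count in range(0, length):
--         if not mapping:
--             break
--         largest_item = max(mapping)
--         top_items.update({largest_item: mapping[largest_item]})
--         mapping.pop(largest_item)
--     return top_items
-- ===== SOURCE B (Python) =====
-- import collections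
-- import heapq
--
-- def order_dict(mapping, n=None):
--     """
--     Order a dict by keys, with an optional arg to limit the number of top keys to get.
--     Single heap selection of the top keys instead of repeated max-scans; like the
--     original, it pops the selected keys out of the argument dict.
--     """
--     length = n or len(mapping)
--     result = collections.OrderedDict()
--     for key in heapq.nlargest(length, mapping):
--         result[key] = mapping.pop(key)
--     return result
-- ===== Notes on version B (the rewrite author's own statement) =====
-- stated objective: faster
-- what changed: A's n repeated max-scan-and-pop passes over the dict are replaced by one heapq.nlargest selection of the top keys followed by a single build pass that pops each selected key.
import Mathlib
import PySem

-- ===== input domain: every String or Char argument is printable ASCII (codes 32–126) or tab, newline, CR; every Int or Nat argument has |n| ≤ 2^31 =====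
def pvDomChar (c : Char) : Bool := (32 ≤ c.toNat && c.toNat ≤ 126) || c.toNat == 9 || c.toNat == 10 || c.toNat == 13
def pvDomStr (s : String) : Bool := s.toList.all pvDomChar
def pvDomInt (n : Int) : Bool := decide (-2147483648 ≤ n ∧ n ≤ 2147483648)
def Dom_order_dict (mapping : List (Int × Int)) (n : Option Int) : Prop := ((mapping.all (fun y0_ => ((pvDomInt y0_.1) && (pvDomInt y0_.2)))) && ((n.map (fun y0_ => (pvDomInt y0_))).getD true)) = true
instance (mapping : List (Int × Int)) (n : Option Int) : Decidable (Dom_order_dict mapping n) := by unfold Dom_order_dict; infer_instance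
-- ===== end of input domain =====

-- B replaces A's repeated max-scan-and-pop loop by one descending selection of the top
-- keys (heapq.nlargest) plus a single build pass; return values agree and both pop the
-- selected keys out of the argument dict (same side effect).

-- ===== PORT A =====
-- 'length = n or len(mapping)' (0 and None are falsy)
def pvLenOr (mapping : List (Int × Int)) (n : Option Int) : Int :=
  match n with
  | none => (mapping.length : Int)
  | some k => if k = 0 then (mapping.length : Int) else k

-- the 'for count in range(0, length)' loop: fuel = number of remaining iterations
def pvLoopA : Nat → PySem.Dict Int Int → PySem.Dict Int Int → PySem.Dict Int Int
  | 0, _, top => top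
  | f + 1, m, top =>
    if m.items = [] then top                            -- if not mapping: break
    else
      match PySem.List.max? m.keys (fun x => x) with    -- largest_item = max(mapping)
      | none => top
      | some k =>
        match m.get? k with                             -- mapping[largest_item]
        | none => top
        | some v => pvLoopA f (m.erase k) (top.insert k v)  -- update + pop

def order_dict (mapping : List (Int × Int)) (n : Option Int) : List (Int × Int) :=
  (pvLoopA (pvLenOr mapping n).toNat (PySem.Dict.mk mapping) PySem.Dict.empty).items

-- ===== PORT B =====
-- heapq.nlargest(length, mapping) ported by its documented meaning sorted(keys, reverse=True)[:length]
def pvTopKeys (mapping : List (Int × Int)) (n : Option Int) : List Int :=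
  (PySem.List.sorted (PySem.Dict.keys (PySem.Dict.mk mapping)) (fun x => x) true).take
    (pvLenOr mapping n).toNat

def order_dict_alt (mapping : List (Int × Int)) (n : Option Int) : List (Int × Int) :=
  ((pvTopKeys mapping n).foldl
      (fun st k =>
        match st.1.pop? k with                          -- result[key] = mapping.pop(key)
        | some (v, m') => (m', st.2.insert k v)
        | none => st)                                   -- unreachable: key was selected from mapping
      (PySem.Dict.mk mapping, PySem.Dict.empty)).2.items

-- ===== PRECONDITION & SPEC =====
-- Pre_ excludes association lists with duplicate keys: they do not represent a Python
-- dict (both programs are given dicts; on a raw pair list both raise TypeError).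
def Pre_order_dict (mapping : List (Int × Int)) (_n : Option Int) : Prop :=
  (mapping.map Prod.fst).Nodup

instance (mapping : List (Int × Int)) (n : Option Int) : Decidable (Pre_order_dict mapping n) := by
  unfold Pre_order_dict; infer_instance

def pvWitness_order_dict : (List (Int × Int)) × Option Int := ([(1, 2), (3, 4), (-5, 6)], some 2)

def Spec_order_dict (mapping : List (Int × Int)) (n : Option Int) (out : List (Int × Int)) : Prop := out = order_dict_alt mapping n
instance (mapping : List (Int × Int)) (n : Option Int) (out : List (Int × Int)) : Decidable (Spec_order_dict mapping n out) := by unfold Spec_order_dict; infer_instance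

-- ===== CLAIM (what is proved, stated in full; the proofs are below) =====
def Claim_equal_order_dict : Prop := ∀ (mapping : List (Int × Int)) (n : Option Int), Dom_order_dict mapping n → Pre_order_dict mapping n → Spec_order_dict mapping n (order_dict mapping n)

-- ===== LEMMAS AND PROOFS =====

-- erasing one key does not change lookups at other keys
theorem pv_find?_filter_ne (t : List (Int × Int)) (k k' : Int) (h : k' ≠ k) :
    List.find? (fun p => p.1 == k') (t.filter (fun p => !(p.1 == k))) =
      List.find? (fun p => p.1 == k') t := by
  induction t with
  | nil => rfl
  | cons p t ih =>
    by_cases hpk : p.1 = k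
    · simp [hpk, Ne.symm h, ih]
    · by_cases hpk' : p.1 = k'
      · simp [hpk', h]
      · simp [hpk, hpk', ih]

theorem pv_get?_erase_of_ne (d : PySem.Dict Int Int) (k k' : Int) (h : k' ≠ k) :
    (d.erase k).get? k' = d.get? k' := by
  obtain ⟨items⟩ := d
  simp only [PySem.Dict.erase, PySem.Dict.get?]
  rw [pv_find?_filter_ne items k k' h]

-- keys of a filtered item list are the filtered keys
theorem pv_map_fst_filter (t : List (Int × Int)) (k : Int) :
    (t.filter (fun p => !(p.1 == k))).map Prod.fst =
      (t.map Prod.fst).filter (fun x => !(x == k)) := by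
  induction t with
  | nil => rfl
  | cons p t ih => by_cases hpk : p.1 = k <;> simp [hpk, ih]

theorem pv_keys_erase (d : PySem.Dict Int Int) (k : Int) (hnd : d.keys.Nodup) :
    (d.erase k).keys = d.keys.erase k := by
  rw [List.Nodup.erase_eq_filter hnd k]
  obtain ⟨items⟩ := d
  simpa [PySem.Dict.erase, PySem.Dict.keys, bne] using pv_map_fst_filter items k

theorem pv_nodup_keys_erase (d : PySem.Dict Int Int) (k : Int) (hnd : d.keys.Nodup) :
    (d.erase k).keys.Nodup := by
  rw [pv_keys_erase d k hnd]; exact hnd.erase k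

-- the head of sorted(keys, reverse=True) is the max: one step of A's selection
theorem pv_sorted_desc_cons (ks : List Int) (hnd : ks.Nodup) (kmax : Int)
    (h : PySem.List.max? ks (fun x => x) = some kmax) :
    PySem.List.sorted ks (fun x => x) true =
      kmax :: PySem.List.sorted (ks.erase kmax) (fun x => x) true := by
  have hmem : kmax ∈ ks := PySem.List.max?_mem h
  have htperm : (PySem.List.sorted (ks.erase kmax) (fun x => x) true).Perm (ks.erase kmax) :=
    PySem.List.sorted_perm _ _ _
  apply PySem.List.sorted_rev_eq_of_perm_of_pairwise_gt
  · exact (htperm.cons kmax).trans (List.perm_cons_erase hmem).symm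
  · constructor
    · intro b hb
      have hbe : b ∈ ks.erase kmax := htperm.mem_iff.mp hb
      have hbm := (List.Nodup.mem_erase_iff hnd).mp hbe
      exact lt_of_le_of_ne (PySem.List.max?_isMax h b hbm.2) hbm.1
    · have hnd' : (PySem.List.sorted (ks.erase kmax) (fun x => x) true).Nodup :=
        htperm.nodup_iff.mpr (hnd.erase kmax)
      have hle : (PySem.List.sorted (ks.erase kmax) (fun x => x) true).Pairwise
          (fun a b => (fun x => x) b ≤ (fun x => x) a) :=
        PySem.List.sorted_pairwise_rev _ _
      exact (hle.and hnd').imp (fun hab => lt_of_le_of_ne hab.1 (Ne.symm hab.2))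

-- A's loop is: fold the first `f` keys of the descending key order into `top`
theorem pv_loopA_eq (f : Nat) (d top : PySem.Dict Int Int) (hnd : d.keys.Nodup) :
    pvLoopA f d top =
      ((PySem.List.sorted d.keys (fun x => x) true).take f).foldl
        (fun t k => t.insert k (d.getD k 0)) top := by
  induction f generalizing d top with
  | zero => simp [pvLoopA]
  | succ f ih =>
    by_cases hnil : d.items = []
    · have hk : d.keys = [] := by simp [PySem.Dict.keys, hnil]
      have hs : PySem.List.sorted d.keys (fun x => x) true = [] :=
        (PySem.List.sorted_eq_nil_iff _ _ _).mpr hk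
      simp [pvLoopA, hnil, hs]
    · have hkne : d.keys ≠ [] := by
        simp only [PySem.Dict.keys]; exact fun h => hnil (List.map_eq_nil_iff.mp h)
      obtain ⟨kmax, hmax⟩ : ∃ k, PySem.List.max? d.keys (fun x => x) = some k := by
        cases hmo : PySem.List.max? d.keys (fun x => x) with
        | none => exact absurd ((PySem.List.max?_eq_none_iff _ _).mp hmo) hkne
        | some k => exact ⟨k, rfl⟩
      have hmem : kmax ∈ d.keys := PySem.List.max?_mem hmax
      have hcont : d.contains kmax = true := (PySem.Dict.contains_iff_mem_keys _ _).mpr hmem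
      obtain ⟨v, hv⟩ : ∃ v, d.get? kmax = some v := by
        cases hg : d.get? kmax with
        | none => rw [(PySem.Dict.get?_eq_none_iff_contains _ _).mp hg] at hcont; exact absurd hcont (by simp)
        | some v => exact ⟨v, rfl⟩
      rw [pv_sorted_desc_cons d.keys hnd kmax hmax, List.take_succ_cons, List.foldl_cons]
      have hstep : pvLoopA (f + 1) d top = pvLoopA f (d.erase kmax) (top.insert kmax v) := by
        simp [pvLoopA, hnil, hmax, hv]
      rw [hstep, ih (d.erase kmax) (top.insert kmax v) (pv_nodup_keys_erase d kmax hnd)]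
      rw [pv_keys_erase d kmax hnd, PySem.Dict.getD_of_get?_eq_some d 0 hv]
      apply PySem.List.foldl_congr_mem
      intro t k hkmem
      have hk' : k ∈ d.keys.erase kmax :=
        (PySem.List.mem_sorted _ _ _ _).mp (List.mem_of_mem_take hkmem)
      have hkne' : k ≠ kmax := ((List.Nodup.mem_erase_iff hnd).mp hk').1
      rw [PySem.Dict.getD_eq_get?_getD, PySem.Dict.getD_eq_get?_getD,
        pv_get?_erase_of_ne d kmax k hkne']

-- B's build loop: popping each selected key in turn is the same insert fold
theorem pv_loopB_eq (ks : List Int) (d top : PySem.Dict Int Int) (hnd : d.keys.Nodup)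
    (hksnd : ks.Nodup) (hmem : ∀ k ∈ ks, k ∈ d.keys) :
    (ks.foldl
        (fun st k =>
          match st.1.pop? k with
          | some (v, m') => (m', st.2.insert k v)
          | none => st)
        (d, top)).2 =
      ks.foldl (fun t k => t.insert k (d.getD k 0)) top := by
  induction ks generalizing d top with
  | nil => rfl
  | cons k t ih =>
    have hkd : k ∈ d.keys := hmem k (List.mem_cons_self ..)
    have hcont : d.contains k = true := (PySem.Dict.contains_iff_mem_keys _ _).mpr hkd
    obtain ⟨v, hv⟩ : ∃ v, d.get? k = some v := by
      cases hg : d.get? k with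
      | none => rw [(PySem.Dict.get?_eq_none_iff_contains _ _).mp hg] at hcont; exact absurd hcont (by simp)
      | some v => exact ⟨v, rfl⟩
    have hpop : d.pop? k = some (v, d.erase k) := by simp [PySem.Dict.pop?, hv]
    simp only [List.foldl_cons, hpop]
    rw [← PySem.Dict.getD_of_get?_eq_some d 0 hv]
    rw [ih (d.erase k) (top.insert k (d.getD k 0))
        (pv_nodup_keys_erase d k hnd) (List.nodup_cons.mp hksnd).2
        (fun k' hk' => by
          rw [pv_keys_erase d k hnd, List.Nodup.mem_erase_iff hnd]
          exact ⟨fun he => (List.nodup_cons.mp hksnd).1 (he ▸ hk'),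
            hmem k' (List.mem_cons_of_mem _ hk')⟩)]
    apply PySem.List.foldl_congr_mem
    intro tp k' hk'
    have hne : k' ≠ k := fun he => (List.nodup_cons.mp hksnd).1 (he ▸ hk')
    rw [PySem.Dict.getD_eq_get?_getD, PySem.Dict.getD_eq_get?_getD,
      pv_get?_erase_of_ne d k k' hne]

-- ===== VERDICT (by name: the statement is the Claim_ definition above) =====
theorem order_dict_spec : Claim_equal_order_dict := by
  intro mapping n _ hpre
  unfold Spec_order_dict order_dict order_dict_alt pvTopKeys
  have hnd : (PySem.Dict.mk mapping).keys.Nodup := by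
    simpa [PySem.Dict.keys] using hpre
  set d : PySem.Dict Int Int := PySem.Dict.mk mapping with hd
  set ks : List Int :=
    (PySem.List.sorted d.keys (fun x => x) true).take (pvLenOr mapping n).toNat with hks
  have hsnd : (PySem.List.sorted d.keys (fun x => x) true).Nodup :=
    (PySem.List.sorted_perm _ _ _).nodup_iff.mpr hnd
  have hksnd : ks.Nodup := (List.take_sublist _ _).nodup hsnd
  have hmem : ∀ k ∈ ks, k ∈ d.keys := fun k hk =>
    (PySem.List.mem_sorted _ _ _ _).mp (List.mem_of_mem_take hk)
  rw [pv_loopB_eq ks d PySem.Dict.empty hnd hksnd hmem,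
    pv_loopA_eq (pvLenOr mapping n).toNat d PySem.Dict.empty hnd]
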